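-- pv_equiv track=rewrite | github.com/fortestaicode/webstrike_pro | core/waf_evasion.py | _null_byte_encoding
-- ===== SOURCE A (Python) =====
-- def _null_byte_encoding(payload: str, param_type: str) -> str:
--     """Split blocked words with null bytes"""
--     blocked = ['union', 'select', 'from', 'where', 'script', 'alert', 'onerror']
--     result = payload
--     for word in blocked:
--         if word.lower() in result.lower():
--             obfuscated = word[0] + '%00' + word[1:]
--             result = result.replace(word, obfuscated)
--     return result
-- ===== SOURCE B (Python) =====
-- def _null_byte_encoding(payload: str, param_type: str) -> str:
--     """Split blocked words with null bytes (single left-to-right scan)."""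
--     blocked = ['union', 'select', 'from', 'where', 'script', 'alert', 'onerror']
--     out = []
--     i = 0
--     n = len(payload)
--     while i < n:
--         for word in blocked:
--             if payload.startswith(word, i):
--                 out.append(word[0] + '%00' + word[1:])
--                 i += len(word)
--                 break
--         else:
--             out.append(payload[i])
--             i += 1
--     return ''.join(out)
-- ===== Notes on version B (the rewrite author's own statement) =====
-- stated objective: alternative
-- what changed: Replaces A's seven sequential whole-payload str.replace passes (each guarded by a redundant case-insensitive containment check) with one left-to-right indexed scan that at each position splits the first blocked keyword found and jumps past it; Pre_ excludes payloads containing 'unionerror', where 'union' and 'onerror' overlap in the text and A's union-replacement re-creates an 'onerror' that A then also splits, while B splits only the leftmost overlapping keyword - both behaviours are defensible on that unspecified corner.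
-- outside the precondition, e.g. on _null_byte_encoding('unionerror', ''): A returns 'u%00nio%00nerror', B returns 'u%00nionerror'
import Mathlib
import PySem

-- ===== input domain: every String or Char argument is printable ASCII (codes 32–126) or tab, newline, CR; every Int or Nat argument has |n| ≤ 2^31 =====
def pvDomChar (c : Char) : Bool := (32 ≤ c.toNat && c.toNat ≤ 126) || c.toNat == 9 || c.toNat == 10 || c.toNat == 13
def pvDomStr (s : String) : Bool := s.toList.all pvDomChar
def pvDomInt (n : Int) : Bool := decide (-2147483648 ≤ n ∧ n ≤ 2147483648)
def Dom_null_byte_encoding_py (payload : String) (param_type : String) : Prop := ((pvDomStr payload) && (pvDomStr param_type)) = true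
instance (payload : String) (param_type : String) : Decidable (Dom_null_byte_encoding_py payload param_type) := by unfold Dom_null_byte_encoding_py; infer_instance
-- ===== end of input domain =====

-- B replaces A's seven sequential global str.replace passes by one left-to-right scan that splits
-- the first blocked keyword found at each position (objective: alternative single-pass algorithm).

-- ===== PORT A =====
def null_byte_encoding_py (payload : String) (param_type : String) : String :=
  let blocked : List String := ["union", "select", "from", "where", "script", "alert", "onerror"]
  blocked.foldl (fun result word =>
    if PySem.Str.isIn (PySem.Str.lower word) (PySem.Str.lower result) then
      -- word[0] + '%00' + word[1:]  (word[0] ported as the slice word[0:1]; identical for the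
      -- nonempty literal words of `blocked`, which are the only words this is applied to)
      let obfuscated := PySem.Str.slice word (some 0) (some 1) ++ "%00" ++ PySem.Str.slice word (some 1) none
      PySem.Str.replace result word obfuscated
    else result) payload

-- ===== PORT B =====
-- Source B: single left-to-right scan over the payload; at each position the first blocked word that
-- starts there is emitted as word[0] + '%00' + word[1:] and the scan jumps past it, otherwise one
-- character is copied.  (Source B's index/append/join loop is rendered as this structural recursion.)
def pvScanB : List Char → List Char
  | [] => []
  | c :: t =>
    if "union".toList <+: c :: t then "u%00nion".toList ++ pvScanB ((c :: t).drop 5)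
    else if "select".toList <+: c :: t then "s%00elect".toList ++ pvScanB ((c :: t).drop 6)
    else if "from".toList <+: c :: t then "f%00rom".toList ++ pvScanB ((c :: t).drop 4)
    else if "where".toList <+: c :: t then "w%00here".toList ++ pvScanB ((c :: t).drop 5)
    else if "script".toList <+: c :: t then "s%00cript".toList ++ pvScanB ((c :: t).drop 6)
    else if "alert".toList <+: c :: t then "a%00lert".toList ++ pvScanB ((c :: t).drop 5)
    else if "onerror".toList <+: c :: t then "o%00nerror".toList ++ pvScanB ((c :: t).drop 7)
    else c :: pvScanB t
  termination_by l => l.length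
  decreasing_by all_goals simp

def null_byte_encoding_py_alt (payload : String) (param_type : String) : String :=
  String.ofList (pvScanB payload.toList)

-- ===== PRECONDITION & SPEC =====
-- Pre_ excludes payloads containing "unionerror": there 'union' and 'onerror' overlap in the text,
-- A's union-replacement re-creates an 'onerror' occurrence which A then also splits, while B splits
-- only the leftmost overlapping keyword — both readings of this unspecified corner are defensible.
def Pre_null_byte_encoding_py (payload : String) (param_type : String) : Prop :=
  PySem.Str.isIn "unionerror" payload = false
instance (payload : String) (param_type : String) : Decidable (Pre_null_byte_encoding_py payload param_type) := by
  unfold Pre_null_byte_encoding_py; infer_instance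
def pvWitness_null_byte_encoding_py : String × String := ("select * from users where id=1 or alert(1)", "query")

def Spec_null_byte_encoding_py (payload : String) (param_type : String) (out : String) : Prop := out = null_byte_encoding_py_alt payload param_type
instance (payload : String) (param_type : String) (out : String) : Decidable (Spec_null_byte_encoding_py payload param_type out) := by unfold Spec_null_byte_encoding_py; infer_instance

-- ===== CLAIM (what is proved, stated in full; the proofs are below) =====
def Claim_equal_null_byte_encoding_py : Prop := ∀ (payload : String) (param_type : String), Dom_null_byte_encoding_py payload param_type → Pre_null_byte_encoding_py payload param_type → Spec_null_byte_encoding_py payload param_type (null_byte_encoding_py payload param_type)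
-- ===== LEMMAS AND PROOFS =====

-- Python's str.replace for a nonempty pattern a :: w, as a plain recursion.
def pvRep (a : Char) (w nw : List Char) : List Char → List Char
  | [] => []
  | c :: t => if (a :: w) <+: c :: t then nw ++ pvRep a w nw (t.drop w.length) else c :: pvRep a w nw t
  termination_by l => l.length
  decreasing_by all_goals simp

theorem pvGo_eq (a : Char) (w nw : List Char) :
    ∀ (fuel : Nat) (l acc : List Char), l.length ≤ fuel →
      PySem.Chars.replace.go (a :: w) nw fuel l acc = acc.reverse ++ pvRep a w nw l := by
  intro fuel
  induction fuel with
  | zero =>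
    intro l acc h
    have : l = [] := List.eq_nil_of_length_eq_zero (Nat.le_zero.mp h)
    subst this
    simp [PySem.Chars.replace.go, pvRep]
  | succ n ih =>
    intro l acc h
    cases l with
    | nil => simp [PySem.Chars.replace.go, pvRep]
    | cons c t =>
      rw [PySem.Chars.replace.go.eq_def]
      simp only []
      by_cases hp : (a :: w) <+: c :: t
      · rw [if_pos (by simpa [List.isPrefixOf_iff_prefix] using hp)]
        rw [ih _ _ (by simp at h ⊢; omega)]
        rw [pvRep, if_pos hp]
        simp
      · rw [if_neg (by simpa [List.isPrefixOf_iff_prefix] using hp)]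
        rw [ih _ _ (by simp at h ⊢; omega)]
        rw [pvRep, if_neg hp]
        simp

theorem pvReplace_eq (a : Char) (w nw l : List Char) :
    PySem.Chars.replace l (a :: w) nw = pvRep a w nw l := by
  unfold PySem.Chars.replace
  rw [if_neg (by simp)]
  exact pvGo_eq a w nw l.length l [] le_rfl

theorem pvRep_cons_neg (a : Char) (w nw : List Char) (c : Char) (t : List Char)
    (h : ¬ (a :: w) <+: c :: t) : pvRep a w nw (c :: t) = c :: pvRep a w nw t := by
  rw [pvRep, if_neg h]

theorem pvRep_prefix (a : Char) (w nw r : List Char) :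
    pvRep a w nw ((a :: w) ++ r) = nw ++ pvRep a w nw r := by
  rw [List.cons_append, pvRep, if_pos (List.cons_prefix_cons.mpr ⟨rfl, List.prefix_append w r⟩),
    List.drop_left]

theorem pvRep_not_infix (a : Char) (w nw : List Char) :
    ∀ l, ¬ (a :: w) <:+: l → pvRep a w nw l = l := by
  intro l
  induction l with
  | nil => intro _; simp [pvRep]
  | cons c t ih =>
    intro h
    rw [pvRep_cons_neg a w nw c t (fun hp => h hp.isInfix),
      ih (fun hi => h (hi.trans (List.suffix_cons c t).isInfix))]

-- inserting nw = a :: '%' :: nr never creates a new prefix occurrence of a '%'-free word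
theorem pvRep_pres (a : Char) (w nr : List Char) (l : List Char) :
    ∀ u : List Char, u ≠ [] → ('%' : Char) ∉ u → ¬ u <+: l →
      ¬ u <+: pvRep a w (a :: '%' :: nr) l := by
  induction l using pvRep.induct a w with
  | case1 =>
    intro u hu _ _ hcon
    rw [pvRep] at hcon
    exact hu (List.prefix_nil.mp hcon)
  | case2 c t h ih =>
    intro u hu hpct hul hcon
    rw [pvRep, if_pos h] at hcon
    cases u with
    | nil => exact hu rfl
    | cons u0 u' =>
      simp only [List.cons_append] at hcon
      rcases List.cons_prefix_cons.mp hcon with ⟨rfl, hu'⟩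
      cases u' with
      | nil =>
        rcases List.cons_prefix_cons.mp h with ⟨rfl, -⟩
        exact hul (List.cons_prefix_cons.mpr ⟨rfl, List.nil_prefix⟩)
      | cons u1 u'' =>
        rcases List.cons_prefix_cons.mp hu' with ⟨rfl, -⟩
        exact hpct (by simp)
  | case3 c t h ih =>
    intro u hu hpct hul hcon
    rw [pvRep, if_neg h] at hcon
    cases u with
    | nil => exact hu rfl
    | cons u0 u' =>
      rcases List.cons_prefix_cons.mp hcon with ⟨rfl, hu'⟩
      cases u' with
      | nil => exact hul (List.cons_prefix_cons.mpr ⟨rfl, List.nil_prefix⟩)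
      | cons u1 u'' =>
        exact ih (u1 :: u'') (by simp) (fun hm => hpct (List.mem_cons_of_mem _ hm))
          (fun hx => hul (List.cons_prefix_cons.mpr ⟨rfl, hx⟩)) hu'

theorem pvNoPrefixAppend {u s : List Char} (l : List Char)
    (h1 : ¬ u <+: s) (h2 : ¬ s <+: u) : ¬ u <+: s ++ l := fun hp =>
  (List.prefix_or_prefix_of_prefix hp (List.prefix_append s l)).elim h1 h2

-- a block s in which the word a :: w starts at no position passes through replace unchanged
theorem pvRep_append (a : Char) (w nw : List Char) (s : List Char)
    (hc : ∀ m, m < s.length → ¬ (a :: w) <+: s.drop m ∧ ¬ s.drop m <+: (a :: w)) :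
    ∀ l, pvRep a w nw (s ++ l) = s ++ pvRep a w nw l := by
  induction s with
  | nil => intro l; simp
  | cons c s' ih =>
    intro l
    have h0 := hc 0 (by simp)
    simp only [List.drop_zero] at h0
    rw [List.cons_append, pvRep_cons_neg a w nw c (s' ++ l)
      (by rw [← List.cons_append]; exact pvNoPrefixAppend l h0.1 h0.2)]
    rw [ih (fun m hm => by
      have := hc (m + 1) (by simpa using Nat.succ_lt_succ hm)
      simpa using this) l]
    rw [List.cons_append]

-- the one real overlap: splitting 'union' leaves the suffix "on"; only if the original text went on
-- with "error" (excluded by Pre_) could the final 'onerror' pass match across that boundary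
theorem pvRep_on_boundary (Y : List Char) (h : ¬ ['e','r','r','o','r'] <+: Y) :
    pvRep 'o' ['n','e','r','r','o','r'] ['o','%','0','0','n','e','r','r','o','r']
        (['u','%','0','0','n','i','o','n'] ++ Y)
      = ['u','%','0','0','n','i','o','n'] ++
        pvRep 'o' ['n','e','r','r','o','r'] ['o','%','0','0','n','e','r','r','o','r'] Y := by
  simp only [List.cons_append, List.nil_append]
  rw [pvRep_cons_neg _ _ _ _ _ (by simp [List.cons_prefix_cons]),
    pvRep_cons_neg _ _ _ _ _ (by simp [List.cons_prefix_cons]),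
    pvRep_cons_neg _ _ _ _ _ (by simp [List.cons_prefix_cons]),
    pvRep_cons_neg _ _ _ _ _ (by simp [List.cons_prefix_cons]),
    pvRep_cons_neg _ _ _ _ _ (by simp [List.cons_prefix_cons]),
    pvRep_cons_neg _ _ _ _ _ (by simp [List.cons_prefix_cons]),
    pvRep_cons_neg _ _ _ _ _ (by simpa [List.cons_prefix_cons] using h),
    pvRep_cons_neg _ _ _ _ _ (by simp [List.cons_prefix_cons])]

-- A's seven passes with the (redundant) case-insensitive guards dropped
def pvA7 (l : List Char) : List Char :=
  pvRep 'o' ['n','e','r','r','o','r'] ['o','%','0','0','n','e','r','r','o','r']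
    (pvRep 'a' ['l','e','r','t'] ['a','%','0','0','l','e','r','t']
      (pvRep 's' ['c','r','i','p','t'] ['s','%','0','0','c','r','i','p','t']
        (pvRep 'w' ['h','e','r','e'] ['w','%','0','0','h','e','r','e']
          (pvRep 'f' ['r','o','m'] ['f','%','0','0','r','o','m']
            (pvRep 's' ['e','l','e','c','t'] ['s','%','0','0','e','l','e','c','t']
              (pvRep 'u' ['n','i','o','n'] ['u','%','0','0','n','i','o','n'] l))))))

theorem pvLit_union : "union".toList = ['u','n','i','o','n'] := by decide
theorem pvLit_select : "select".toList = ['s','e','l','e','c','t'] := by decide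
theorem pvLit_from : "from".toList = ['f','r','o','m'] := by decide
theorem pvLit_where : "where".toList = ['w','h','e','r','e'] := by decide
theorem pvLit_script : "script".toList = ['s','c','r','i','p','t'] := by decide
theorem pvLit_alert : "alert".toList = ['a','l','e','r','t'] := by decide
theorem pvLit_onerror : "onerror".toList = ['o','n','e','r','r','o','r'] := by decide
theorem pvLit_obU : "u%00nion".toList = ['u','%','0','0','n','i','o','n'] := by decide
theorem pvLit_obSe : "s%00elect".toList = ['s','%','0','0','e','l','e','c','t'] := by decide
theorem pvLit_obF : "f%00rom".toList = ['f','%','0','0','r','o','m'] := by decide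
theorem pvLit_obW : "w%00here".toList = ['w','%','0','0','h','e','r','e'] := by decide
theorem pvLit_obSc : "s%00cript".toList = ['s','%','0','0','c','r','i','p','t'] := by decide
theorem pvLit_obA : "a%00lert".toList = ['a','%','0','0','l','e','r','t'] := by decide
theorem pvLit_obO : "o%00nerror".toList = ['o','%','0','0','n','e','r','r','o','r'] := by decide
theorem pvLit_ue : "unionerror".toList = ['u','n','i','o','n','e','r','r','o','r'] := by decide

theorem pvStepNeg (a : Char) (w nw : List Char) (c : Char) (Z t : List Char)
    (h : ¬ (a :: w) <+: c :: t) (hch : ¬ w <+: t → ¬ w <+: Z) :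
    pvRep a w nw (c :: Z) = c :: pvRep a w nw Z := by
  apply pvRep_cons_neg
  intro hp
  rcases List.cons_prefix_cons.mp hp with ⟨rfl, hwZ⟩
  exact hch (fun hwt => h (List.cons_prefix_cons.mpr ⟨rfl, hwt⟩)) hwZ
theorem pvMain : ∀ (n : Nat) (l : List Char), l.length ≤ n →
    ¬ (['u','n','i','o','n','e','r','r','o','r'] <:+: l) → pvA7 l = pvScanB l := by
  intro n
  induction n with
  | zero =>
    intro l hl _
    have : l = [] := List.eq_nil_of_length_eq_zero (Nat.le_zero.mp hl)
    subst this
    simp [pvA7, pvRep, pvScanB]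
  | succ n ih =>
    intro l hl hpre
    by_cases hU : ['u','n','i','o','n'] <+: l
    · obtain ⟨r, rfl⟩ := hU
      have herr : ¬ ['e','r','r','o','r'] <+: r := by
        intro hp
        obtain ⟨t', rfl⟩ := hp
        exact hpre (List.IsPrefix.isInfix ⟨t', by simp⟩)
      have hh1 := pvRep_pres 'u' ['n','i','o','n'] ['0','0','n','i','o','n'] _ _ (by decide) (by decide) herr
      have hh2 := pvRep_pres 's' ['e','l','e','c','t'] ['0','0','e','l','e','c','t'] _ _ (by decide) (by decide) hh1
      have hh3 := pvRep_pres 'f' ['r','o','m'] ['0','0','r','o','m'] _ _ (by decide) (by decide) hh2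
      have hh4 := pvRep_pres 'w' ['h','e','r','e'] ['0','0','h','e','r','e'] _ _ (by decide) (by decide) hh3
      have hh5 := pvRep_pres 's' ['c','r','i','p','t'] ['0','0','c','r','i','p','t'] _ _ (by decide) (by decide) hh4
      have hh6 := pvRep_pres 'a' ['l','e','r','t'] ['0','0','l','e','r','t'] _ _ (by decide) (by decide) hh5
      have key : pvA7 (['u','n','i','o','n'] ++ r) =
          ['u','%','0','0','n','i','o','n'] ++ pvA7 r := by
        unfold pvA7
        rw [pvRep_prefix 'u' ['n','i','o','n'] ['u','%','0','0','n','i','o','n']]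
        rw [pvRep_append 's' ['e','l','e','c','t'] ['s','%','0','0','e','l','e','c','t']
          ['u','%','0','0','n','i','o','n'] (by decide)]
        rw [pvRep_append 'f' ['r','o','m'] ['f','%','0','0','r','o','m']
          ['u','%','0','0','n','i','o','n'] (by decide)]
        rw [pvRep_append 'w' ['h','e','r','e'] ['w','%','0','0','h','e','r','e']
          ['u','%','0','0','n','i','o','n'] (by decide)]
        rw [pvRep_append 's' ['c','r','i','p','t'] ['s','%','0','0','c','r','i','p','t']
          ['u','%','0','0','n','i','o','n'] (by decide)]
        rw [pvRep_append 'a' ['l','e','r','t'] ['a','%','0','0','l','e','r','t']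
          ['u','%','0','0','n','i','o','n'] (by decide)]
        rw [pvRep_on_boundary _ hh6]
      rw [key, ih r (by simp at hl; omega)
        (fun hinf => hpre (hinf.trans (List.suffix_append _ r).isInfix))]
      simp only [List.cons_append, List.nil_append]
      rw [pvScanB]
      simp [pvLit_union, pvLit_select, pvLit_from, pvLit_where, pvLit_script, pvLit_alert,
        pvLit_onerror, pvLit_obU, pvLit_obSe, pvLit_obF, pvLit_obW, pvLit_obSc, pvLit_obA,
        pvLit_obO, List.cons_prefix_cons]
    ·
      by_cases hS : ['s','e','l','e','c','t'] <+: l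
      · obtain ⟨r, rfl⟩ := hS
        have key : pvA7 (['s','e','l','e','c','t'] ++ r) =
            ['s','%','0','0','e','l','e','c','t'] ++ pvA7 r := by
          unfold pvA7
          rw [pvRep_append 'u' ['n','i','o','n'] ['u','%','0','0','n','i','o','n']
            ['s','e','l','e','c','t'] (by decide)]
          rw [pvRep_prefix 's' ['e','l','e','c','t'] ['s','%','0','0','e','l','e','c','t']]
          rw [pvRep_append 'f' ['r','o','m'] ['f','%','0','0','r','o','m']
            ['s','%','0','0','e','l','e','c','t'] (by decide)]
          rw [pvRep_append 'w' ['h','e','r','e'] ['w','%','0','0','h','e','r','e']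
            ['s','%','0','0','e','l','e','c','t'] (by decide)]
          rw [pvRep_append 's' ['c','r','i','p','t'] ['s','%','0','0','c','r','i','p','t']
            ['s','%','0','0','e','l','e','c','t'] (by decide)]
          rw [pvRep_append 'a' ['l','e','r','t'] ['a','%','0','0','l','e','r','t']
            ['s','%','0','0','e','l','e','c','t'] (by decide)]
          rw [pvRep_append 'o' ['n','e','r','r','o','r'] ['o','%','0','0','n','e','r','r','o','r']
            ['s','%','0','0','e','l','e','c','t'] (by decide)]
        rw [key, ih r (by simp at hl; omega)
          (fun hinf => hpre (hinf.trans (List.suffix_append _ r).isInfix))]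
        simp only [List.cons_append, List.nil_append]
        rw [pvScanB]
        simp [pvLit_union, pvLit_select, pvLit_from, pvLit_where, pvLit_script, pvLit_alert,
          pvLit_onerror, pvLit_obU, pvLit_obSe, pvLit_obF, pvLit_obW, pvLit_obSc, pvLit_obA,
          pvLit_obO, List.cons_prefix_cons]
      ·
        by_cases hF : ['f','r','o','m'] <+: l
        · obtain ⟨r, rfl⟩ := hF
          have key : pvA7 (['f','r','o','m'] ++ r) =
              ['f','%','0','0','r','o','m'] ++ pvA7 r := by
            unfold pvA7
            rw [pvRep_append 'u' ['n','i','o','n'] ['u','%','0','0','n','i','o','n']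
              ['f','r','o','m'] (by decide)]
            rw [pvRep_append 's' ['e','l','e','c','t'] ['s','%','0','0','e','l','e','c','t']
              ['f','r','o','m'] (by decide)]
            rw [pvRep_prefix 'f' ['r','o','m'] ['f','%','0','0','r','o','m']]
            rw [pvRep_append 'w' ['h','e','r','e'] ['w','%','0','0','h','e','r','e']
              ['f','%','0','0','r','o','m'] (by decide)]
            rw [pvRep_append 's' ['c','r','i','p','t'] ['s','%','0','0','c','r','i','p','t']
              ['f','%','0','0','r','o','m'] (by decide)]
            rw [pvRep_append 'a' ['l','e','r','t'] ['a','%','0','0','l','e','r','t']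
              ['f','%','0','0','r','o','m'] (by decide)]
            rw [pvRep_append 'o' ['n','e','r','r','o','r'] ['o','%','0','0','n','e','r','r','o','r']
              ['f','%','0','0','r','o','m'] (by decide)]
          rw [key, ih r (by simp at hl; omega)
            (fun hinf => hpre (hinf.trans (List.suffix_append _ r).isInfix))]
          simp only [List.cons_append, List.nil_append]
          rw [pvScanB]
          simp [pvLit_union, pvLit_select, pvLit_from, pvLit_where, pvLit_script, pvLit_alert,
            pvLit_onerror, pvLit_obU, pvLit_obSe, pvLit_obF, pvLit_obW, pvLit_obSc, pvLit_obA,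
            pvLit_obO, List.cons_prefix_cons]
        ·
          by_cases hW : ['w','h','e','r','e'] <+: l
          · obtain ⟨r, rfl⟩ := hW
            have key : pvA7 (['w','h','e','r','e'] ++ r) =
                ['w','%','0','0','h','e','r','e'] ++ pvA7 r := by
              unfold pvA7
              rw [pvRep_append 'u' ['n','i','o','n'] ['u','%','0','0','n','i','o','n']
                ['w','h','e','r','e'] (by decide)]
              rw [pvRep_append 's' ['e','l','e','c','t'] ['s','%','0','0','e','l','e','c','t']
                ['w','h','e','r','e'] (by decide)]
              rw [pvRep_append 'f' ['r','o','m'] ['f','%','0','0','r','o','m']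
                ['w','h','e','r','e'] (by decide)]
              rw [pvRep_prefix 'w' ['h','e','r','e'] ['w','%','0','0','h','e','r','e']]
              rw [pvRep_append 's' ['c','r','i','p','t'] ['s','%','0','0','c','r','i','p','t']
                ['w','%','0','0','h','e','r','e'] (by decide)]
              rw [pvRep_append 'a' ['l','e','r','t'] ['a','%','0','0','l','e','r','t']
                ['w','%','0','0','h','e','r','e'] (by decide)]
              rw [pvRep_append 'o' ['n','e','r','r','o','r'] ['o','%','0','0','n','e','r','r','o','r']
                ['w','%','0','0','h','e','r','e'] (by decide)]
            rw [key, ih r (by simp at hl; omega)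
              (fun hinf => hpre (hinf.trans (List.suffix_append _ r).isInfix))]
            simp only [List.cons_append, List.nil_append]
            rw [pvScanB]
            simp [pvLit_union, pvLit_select, pvLit_from, pvLit_where, pvLit_script, pvLit_alert,
              pvLit_onerror, pvLit_obU, pvLit_obSe, pvLit_obF, pvLit_obW, pvLit_obSc, pvLit_obA,
              pvLit_obO, List.cons_prefix_cons]
          ·
            by_cases hSc : ['s','c','r','i','p','t'] <+: l
            · obtain ⟨r, rfl⟩ := hSc
              have key : pvA7 (['s','c','r','i','p','t'] ++ r) =
                  ['s','%','0','0','c','r','i','p','t'] ++ pvA7 r := by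
                unfold pvA7
                rw [pvRep_append 'u' ['n','i','o','n'] ['u','%','0','0','n','i','o','n']
                  ['s','c','r','i','p','t'] (by decide)]
                rw [pvRep_append 's' ['e','l','e','c','t'] ['s','%','0','0','e','l','e','c','t']
                  ['s','c','r','i','p','t'] (by decide)]
                rw [pvRep_append 'f' ['r','o','m'] ['f','%','0','0','r','o','m']
                  ['s','c','r','i','p','t'] (by decide)]
                rw [pvRep_append 'w' ['h','e','r','e'] ['w','%','0','0','h','e','r','e']
                  ['s','c','r','i','p','t'] (by decide)]
                rw [pvRep_prefix 's' ['c','r','i','p','t'] ['s','%','0','0','c','r','i','p','t']]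
                rw [pvRep_append 'a' ['l','e','r','t'] ['a','%','0','0','l','e','r','t']
                  ['s','%','0','0','c','r','i','p','t'] (by decide)]
                rw [pvRep_append 'o' ['n','e','r','r','o','r'] ['o','%','0','0','n','e','r','r','o','r']
                  ['s','%','0','0','c','r','i','p','t'] (by decide)]
              rw [key, ih r (by simp at hl; omega)
                (fun hinf => hpre (hinf.trans (List.suffix_append _ r).isInfix))]
              simp only [List.cons_append, List.nil_append]
              rw [pvScanB]
              simp [pvLit_union, pvLit_select, pvLit_from, pvLit_where, pvLit_script, pvLit_alert,
                pvLit_onerror, pvLit_obU, pvLit_obSe, pvLit_obF, pvLit_obW, pvLit_obSc, pvLit_obA,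
                pvLit_obO, List.cons_prefix_cons]
            ·
              by_cases hA : ['a','l','e','r','t'] <+: l
              · obtain ⟨r, rfl⟩ := hA
                have key : pvA7 (['a','l','e','r','t'] ++ r) =
                    ['a','%','0','0','l','e','r','t'] ++ pvA7 r := by
                  unfold pvA7
                  rw [pvRep_append 'u' ['n','i','o','n'] ['u','%','0','0','n','i','o','n']
                    ['a','l','e','r','t'] (by decide)]
                  rw [pvRep_append 's' ['e','l','e','c','t'] ['s','%','0','0','e','l','e','c','t']
                    ['a','l','e','r','t'] (by decide)]
                  rw [pvRep_append 'f' ['r','o','m'] ['f','%','0','0','r','o','m']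
                    ['a','l','e','r','t'] (by decide)]
                  rw [pvRep_append 'w' ['h','e','r','e'] ['w','%','0','0','h','e','r','e']
                    ['a','l','e','r','t'] (by decide)]
                  rw [pvRep_append 's' ['c','r','i','p','t'] ['s','%','0','0','c','r','i','p','t']
                    ['a','l','e','r','t'] (by decide)]
                  rw [pvRep_prefix 'a' ['l','e','r','t'] ['a','%','0','0','l','e','r','t']]
                  rw [pvRep_append 'o' ['n','e','r','r','o','r'] ['o','%','0','0','n','e','r','r','o','r']
                    ['a','%','0','0','l','e','r','t'] (by decide)]
                rw [key, ih r (by simp at hl; omega)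
                  (fun hinf => hpre (hinf.trans (List.suffix_append _ r).isInfix))]
                simp only [List.cons_append, List.nil_append]
                rw [pvScanB]
                simp [pvLit_union, pvLit_select, pvLit_from, pvLit_where, pvLit_script, pvLit_alert,
                  pvLit_onerror, pvLit_obU, pvLit_obSe, pvLit_obF, pvLit_obW, pvLit_obSc, pvLit_obA,
                  pvLit_obO, List.cons_prefix_cons]
              ·
                by_cases hO : ['o','n','e','r','r','o','r'] <+: l
                · obtain ⟨r, rfl⟩ := hO
                  have key : pvA7 (['o','n','e','r','r','o','r'] ++ r) =
                      ['o','%','0','0','n','e','r','r','o','r'] ++ pvA7 r := by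
                    unfold pvA7
                    rw [pvRep_append 'u' ['n','i','o','n'] ['u','%','0','0','n','i','o','n']
                      ['o','n','e','r','r','o','r'] (by decide)]
                    rw [pvRep_append 's' ['e','l','e','c','t'] ['s','%','0','0','e','l','e','c','t']
                      ['o','n','e','r','r','o','r'] (by decide)]
                    rw [pvRep_append 'f' ['r','o','m'] ['f','%','0','0','r','o','m']
                      ['o','n','e','r','r','o','r'] (by decide)]
                    rw [pvRep_append 'w' ['h','e','r','e'] ['w','%','0','0','h','e','r','e']
                      ['o','n','e','r','r','o','r'] (by decide)]
                    rw [pvRep_append 's' ['c','r','i','p','t'] ['s','%','0','0','c','r','i','p','t']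
                      ['o','n','e','r','r','o','r'] (by decide)]
                    rw [pvRep_append 'a' ['l','e','r','t'] ['a','%','0','0','l','e','r','t']
                      ['o','n','e','r','r','o','r'] (by decide)]
                    rw [pvRep_prefix 'o' ['n','e','r','r','o','r'] ['o','%','0','0','n','e','r','r','o','r']]
                  rw [key, ih r (by simp at hl; omega)
                    (fun hinf => hpre (hinf.trans (List.suffix_append _ r).isInfix))]
                  simp only [List.cons_append, List.nil_append]
                  rw [pvScanB]
                  simp [pvLit_union, pvLit_select, pvLit_from, pvLit_where, pvLit_script, pvLit_alert,
                    pvLit_onerror, pvLit_obU, pvLit_obSe, pvLit_obF, pvLit_obW, pvLit_obSc, pvLit_obA,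
                    pvLit_obO, List.cons_prefix_cons]
                ·
                  cases l with
                  | nil => simp [pvA7, pvRep, pvScanB]
                  | cons c t =>
                    have P1 : ∀ u : List Char, u ≠ [] → ('%' : Char) ∉ u → ¬ u <+: t →
                        ¬ u <+: pvRep 'u' ['n','i','o','n'] ['u','%','0','0','n','i','o','n'] t :=
                      fun u ha hb hc => pvRep_pres 'u' ['n','i','o','n'] ['0','0','n','i','o','n'] t u ha hb hc
                    have P2 := fun (u : List Char) (ha : u ≠ []) (hb : ('%' : Char) ∉ u) (hc : ¬ u <+: t) =>
                      pvRep_pres 's' ['e','l','e','c','t'] ['0','0','e','l','e','c','t'] _ u ha hb (P1 u ha hb hc)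
                    have P3 := fun (u : List Char) (ha : u ≠ []) (hb : ('%' : Char) ∉ u) (hc : ¬ u <+: t) =>
                      pvRep_pres 'f' ['r','o','m'] ['0','0','r','o','m'] _ u ha hb (P2 u ha hb hc)
                    have P4 := fun (u : List Char) (ha : u ≠ []) (hb : ('%' : Char) ∉ u) (hc : ¬ u <+: t) =>
                      pvRep_pres 'w' ['h','e','r','e'] ['0','0','h','e','r','e'] _ u ha hb (P3 u ha hb hc)
                    have P5 := fun (u : List Char) (ha : u ≠ []) (hb : ('%' : Char) ∉ u) (hc : ¬ u <+: t) =>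
                      pvRep_pres 's' ['c','r','i','p','t'] ['0','0','c','r','i','p','t'] _ u ha hb (P4 u ha hb hc)
                    have P6 := fun (u : List Char) (ha : u ≠ []) (hb : ('%' : Char) ∉ u) (hc : ¬ u <+: t) =>
                      pvRep_pres 'a' ['l','e','r','t'] ['0','0','l','e','r','t'] _ u ha hb (P5 u ha hb hc)
                    have key : pvA7 (c :: t) = c :: pvA7 t := by
                      unfold pvA7
                      rw [pvStepNeg 'u' ['n','i','o','n'] ['u','%','0','0','n','i','o','n'] c t t hU (fun h => h)]
                      rw [pvStepNeg 's' ['e','l','e','c','t'] ['s','%','0','0','e','l','e','c','t'] c _ t hS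
                        (P1 ['e','l','e','c','t'] (by decide) (by decide))]
                      rw [pvStepNeg 'f' ['r','o','m'] ['f','%','0','0','r','o','m'] c _ t hF
                        (P2 ['r','o','m'] (by decide) (by decide))]
                      rw [pvStepNeg 'w' ['h','e','r','e'] ['w','%','0','0','h','e','r','e'] c _ t hW
                        (P3 ['h','e','r','e'] (by decide) (by decide))]
                      rw [pvStepNeg 's' ['c','r','i','p','t'] ['s','%','0','0','c','r','i','p','t'] c _ t hSc
                        (P4 ['c','r','i','p','t'] (by decide) (by decide))]
                      rw [pvStepNeg 'a' ['l','e','r','t'] ['a','%','0','0','l','e','r','t'] c _ t hA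
                        (P5 ['l','e','r','t'] (by decide) (by decide))]
                      rw [pvStepNeg 'o' ['n','e','r','r','o','r'] ['o','%','0','0','n','e','r','r','o','r'] c _ t hO
                        (P6 ['n','e','r','r','o','r'] (by decide) (by decide))]
                    rw [key, ih t (by simp at hl; omega)
                      (fun hinf => hpre (hinf.trans (List.suffix_cons c t).isInfix))]
                    rw [pvScanB]
                    simp only [pvLit_union, pvLit_select, pvLit_from, pvLit_where, pvLit_script,
                      pvLit_alert, pvLit_onerror]
                    rw [if_neg hU, if_neg hS, if_neg hF, if_neg hW, if_neg hSc, if_neg hA, if_neg hO]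

theorem pvStage (wd : String) (a : Char) (w' nw : List Char) (ob : String)
    (hw : wd.toList = a :: w')
    (hl : wd.toList.map PySem.Chars.lowerChar = wd.toList)
    (hn : ob.toList = nw) (r : String) :
    (if PySem.Str.isIn (PySem.Str.lower wd) (PySem.Str.lower r) then PySem.Str.replace r wd ob
     else r).toList = pvRep a w' nw r.toList := by
  by_cases hg : PySem.Str.isIn (PySem.Str.lower wd) (PySem.Str.lower r) = true
  · rw [if_pos hg, PySem.Str.toList_replace, hw, hn, pvReplace_eq]
  · rw [if_neg hg]
    have hg' : PySem.Chars.isIn (wd.toList.map PySem.Chars.lowerChar)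
        (r.toList.map PySem.Chars.lowerChar) = false := by
      have : PySem.Str.isIn (PySem.Str.lower wd) (PySem.Str.lower r) = false := by
        simpa using hg
      rw [PySem.Str.isIn_eq, PySem.Str.toList_lower, PySem.Str.toList_lower] at this
      simpa [PySem.Chars.lower] using this
    rw [hl] at hg'
    symm
    apply pvRep_not_infix a w' nw r.toList
    intro hinf
    have hm := List.IsInfix.map PySem.Chars.lowerChar hinf
    rw [← hw, hl] at hm
    exact (PySem.Chars.isIn_eq_false_iff _ _).mp hg' hm

theorem pvPortA (payload pt : String) :
    (null_byte_encoding_py payload pt).toList = pvA7 payload.toList := by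
  unfold null_byte_encoding_py
  simp only [List.foldl_cons, List.foldl_nil]
  rw [pvStage "onerror" 'o' ['n','e','r','r','o','r'] ['o','%','0','0','n','e','r','r','o','r'] _
    (by decide) (by decide) (by decide)]
  rw [pvStage "alert" 'a' ['l','e','r','t'] ['a','%','0','0','l','e','r','t'] _
    (by decide) (by decide) (by decide)]
  rw [pvStage "script" 's' ['c','r','i','p','t'] ['s','%','0','0','c','r','i','p','t'] _
    (by decide) (by decide) (by decide)]
  rw [pvStage "where" 'w' ['h','e','r','e'] ['w','%','0','0','h','e','r','e'] _
    (by decide) (by decide) (by decide)]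
  rw [pvStage "from" 'f' ['r','o','m'] ['f','%','0','0','r','o','m'] _
    (by decide) (by decide) (by decide)]
  rw [pvStage "select" 's' ['e','l','e','c','t'] ['s','%','0','0','e','l','e','c','t'] _
    (by decide) (by decide) (by decide)]
  rw [pvStage "union" 'u' ['n','i','o','n'] ['u','%','0','0','n','i','o','n'] _
    (by decide) (by decide) (by decide)]
  rfl

-- ===== VERDICT (by name: the statement is the Claim_ definition above) =====
theorem null_byte_encoding_py_spec : Claim_equal_null_byte_encoding_py := by
  intro payload pt hdom hpre
  unfold Spec_null_byte_encoding_py null_byte_encoding_py_alt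
  have hpre' : ¬ (['u','n','i','o','n','e','r','r','o','r'] <:+: payload.toList) := by
    have h0 : PySem.Chars.isIn "unionerror".toList payload.toList = false := by
      rw [← PySem.Str.isIn_eq]; exact hpre
    rw [pvLit_ue] at h0
    exact (PySem.Chars.isIn_eq_false_iff _ _).mp h0
  calc null_byte_encoding_py payload pt
      = String.ofList (null_byte_encoding_py payload pt).toList := (String.ofList_toList).symm
    _ = String.ofList (pvScanB payload.toList) := by
        rw [pvPortA payload pt, pvMain payload.toList.length payload.toList le_rfl hpre']
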